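-- pv_equiv track=rewrite | github.com/baowj-678/leetcode | .github/workflows/merge-readme.py | merge_md_block
-- ===== SOURCE A (Python) =====
-- def merge_md_block(main, branch):
--     new_md = []
--     main_h2 = dict()
--     branch_h2 = dict()
--     main_h2_block, main_h2_block_title = [], None
--     branch_h2_block, branch_h2_block_title = [], None
--     # generate main h2 block
--     for line in main:
--         if len(line) > 3 and line[:3] == "## ":
--             if main_h2_block_title is not None:
--                 main_h2[main_h2_block_title] = main_h2_block
--             main_h2_block = [line]
--             main_h2_block_title = line
--         else:
--             main_h2_block.append(line)
--     if main_h2_block_title is not None: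
--         main_h2[main_h2_block_title] = main_h2_block
--     # generate branch h2 block
--     for line in branch:
--         if len(line) > 3 and line[:3] == "## ":
--             if branch_h2_block_title is not None:
--                 branch_h2[branch_h2_block_title] = branch_h2_block
--             branch_h2_block = [line]
--             branch_h2_block_title = line
--         else:
--             branch_h2_block.append(line)
--     if branch_h2_block_title is not None:
--         branch_h2[branch_h2_block_title] = branch_h2_block
--     # merge h2 block
--     for key, value in main_h2.items():
--         if branch_h2.get(key) is not None:
--             tmp = merge_h2_block(value, branch_h2[key])
--             for line in tmp:
--                 new_md.append(line)
--         else: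
--             for line in value:
--                 new_md.append(line)
--     for key, value in branch_h2.items():
--         if main_h2.get(key) is None:
--             for line in value:
--                 new_md.append(line)
--     return new_md
--
-- def merge_h2_block(main, branch):
--     new_md = [main[0]]
--     main_h3 = dict()
--     branch_h3 = dict()
--     main_h3_block, main_h3_block_title = [], None
--     branch_h3_block, branch_h3_block_title = [], None
--     # generate main h3 block
--     for line in main[1:]:
--         if len(line) > 4 and line[:4] == "### ":
--             if main_h3_block_title is not None:
--                 main_h3[main_h3_block_title] = main_h3_block
--             main_h3_block = [line]
--             main_h3_block_title = line
--         else: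
--             main_h3_block.append(line)
--     if main_h3_block_title is not None:
--         main_h3[main_h3_block_title] = main_h3_block
--     # generate branch h3 block
--     for line in branch[1:]:
--         if len(line) > 4 and line[:4] == "### ":
--             if branch_h3_block_title is not None:
--                 branch_h3[branch_h3_block_title] = branch_h3_block
--             branch_h3_block = [line]
--             branch_h3_block_title = line
--         else:
--             branch_h3_block.append(line)
--     if branch_h3_block_title is not None:
--         branch_h3[branch_h3_block_title] = branch_h3_block
--     # merge h3 block
--     for key, value in main_h3.items():
--         if branch_h3.get(key) is not None:
--             tmp = merge_h3_block(value, branch_h3[key])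
--             for line in tmp:
--                 new_md.append(line)
--         else:
--             for line in value:
--                 new_md.append(line)
--     for key, value in branch_h3.items():
--         if main_h3.get(key) is None:
--             for line in value:
--                 new_md.append(line)
--     return new_md
--
-- def merge_h3_block(main, branch):
--     new_ul = []
--     new_text = [main[0]]
--     for line in main[1:]:
--         if len(line) > 2 and line[:2] == "* ":
--             new_ul.append(line)
--         else:
--             new_text.append(line)
--     for line in branch[1:]:
--         if len(line) > 2 and line[:2] == "* ":
--             new_ul.append(line)
--         else:
--             new_text.append(line)
--     return new_text
-- ===== SOURCE B (Python) =====
-- def _segments(lines, prefix):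
--     """Ordered map title -> block (title line included). A repeated title keeps
--     its first position but the last block's content; lines before the first
--     header are dropped."""
--     n = len(prefix)
--     d = {}
--     title = None
--     for line in lines:
--         if len(line) > n and line[:n] == prefix:
--             title = line
--             d[title] = [line]
--         elif title is not None:
--             d[title].append(line)
--     return d
--
--
-- def _merge_children(main_lines, branch_lines, prefixes):
--     """Segment both sides by prefixes[0], merge shared titles recursively
--     (main's order first), then append branch-only blocks."""
--     md = _segments(main_lines, prefixes[0])
--     bd = _segments(branch_lines, prefixes[0])
--     out = []
--     for title, block in md.items():
--         if title in bd:
--             out += _merge_block(block, bd[title], prefixes[1:])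
--         else:
--             out += block
--     for title, block in bd.items():
--         if title not in md:
--             out += block
--     return out
--
--
-- def _merge_block(main_block, branch_block, prefixes):
--     if not prefixes:
--         # innermost level: keep the title and the non-bullet lines of both bodies
--         keep = lambda l: not (len(l) > 2 and l[:2] == "* ")
--         return ([main_block[0]]
--                 + [l for l in main_block[1:] if keep(l)]
--                 + [l for l in branch_block[1:] if keep(l)])
--     return [main_block[0]] + _merge_children(main_block[1:], branch_block[1:], prefixes)
--
--
-- def merge_md_block(main, branch):
--     return _merge_children(main, branch, ["## ", "### "])
-- ===== Notes on version B (the rewrite author's own statement) =====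
-- stated objective: simpler
-- what changed: A's three copy-pasted stateful merge functions (h2, h3, leaf) are replaced by one generic prefix-segmentation pass (building the title->block dict incrementally) plus a single recursion over the list of header prefixes ['## ', '### '], with the bullet-dropping leaf expressed as filters.
import Mathlib
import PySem

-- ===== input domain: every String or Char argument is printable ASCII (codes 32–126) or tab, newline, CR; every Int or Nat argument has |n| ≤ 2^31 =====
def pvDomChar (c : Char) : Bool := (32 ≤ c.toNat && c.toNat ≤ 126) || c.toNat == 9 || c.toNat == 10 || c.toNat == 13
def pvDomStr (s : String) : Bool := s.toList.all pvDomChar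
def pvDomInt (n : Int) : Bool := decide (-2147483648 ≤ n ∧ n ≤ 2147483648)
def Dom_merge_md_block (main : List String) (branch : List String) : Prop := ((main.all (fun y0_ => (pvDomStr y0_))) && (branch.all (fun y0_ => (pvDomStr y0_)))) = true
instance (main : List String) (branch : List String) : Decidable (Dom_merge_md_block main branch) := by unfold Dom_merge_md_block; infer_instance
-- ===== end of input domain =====

-- B replaces A's three copy-pasted stateful merge functions by one generic segmentation
-- pass plus a single recursion over the list of header prefixes (objective: simpler).

-- `len(line) > n and line[:n] == pfx` for an n-char prefix pfx (exact: Python's s[:n] is the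
-- first min(n, len) characters, i.e. List.take n on the character list).
def pvHdr (pfx : List Char) (line : String) : Bool :=
  decide (pfx.length < line.toList.length) && (line.toList.take pfx.length == pfx)

-- ===== PORT A =====
-- A's block-collection loop body (the identical loop appears four times in A's source,
-- twice with prefix "## " and twice with "### "); state = (dict, current block, current title).
def parseStepA (pfx : List Char)
    (s : PySem.Dict String (List String) × List String × Option String) (line : String) :
    PySem.Dict String (List String) × List String × Option String :=
  if pvHdr pfx line then
    match s.2.2 with
    | some t => (s.1.insert t s.2.1, ([line], some line))
    | none => (s.1, ([line], some line))
  else (s.1, (s.2.1 ++ [line], s.2.2))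

-- A's loop "for line in lines: …" followed by the final "if …_title is not None: d[title] = block".
def parseBlocksA (pfx : List Char) (lines : List String) : PySem.Dict String (List String) :=
  let s := lines.foldl (parseStepA pfx) (PySem.Dict.empty, ([], none))
  match s.2.2 with
  | some t => s.1.insert t s.2.1
  | none => s.1

-- merge_h3_block: state = (new_ul, new_text); new_ul is built and then discarded, as in A.
-- main[0] is ported as headD "" : every block A passes here starts with its header line.
def merge_h3_block (main : List String) (branch : List String) : List String :=
  let s := (main.drop 1).foldl
    (fun (s : List String × List String) l =>
      if pvHdr ("* ".toList) l then (s.1 ++ [l], s.2) else (s.1, s.2 ++ [l]))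
    ([], [main.headD ""])
  let s := (branch.drop 1).foldl
    (fun (s : List String × List String) l =>
      if pvHdr ("* ".toList) l then (s.1 ++ [l], s.2) else (s.1, s.2 ++ [l]))
    s
  s.2

def merge_h2_block (main : List String) (branch : List String) : List String :=
  let main_h3 := parseBlocksA ("### ".toList) (main.drop 1)
  let branch_h3 := parseBlocksA ("### ".toList) (branch.drop 1)
  let new_md := main_h3.items.foldl
    (fun acc kv =>
      match branch_h3.get? kv.1 with
      | some bv => (merge_h3_block kv.2 bv).foldl (fun a l => a ++ [l]) acc
      | none => kv.2.foldl (fun a l => a ++ [l]) acc)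
    [main.headD ""]
  branch_h3.items.foldl
    (fun acc kv =>
      match main_h3.get? kv.1 with
      | none => kv.2.foldl (fun a l => a ++ [l]) acc
      | some _ => acc)
    new_md

def merge_md_block (main : List String) (branch : List String) : List String :=
  let main_h2 := parseBlocksA ("## ".toList) main
  let branch_h2 := parseBlocksA ("## ".toList) branch
  let new_md := main_h2.items.foldl
    (fun acc kv =>
      match branch_h2.get? kv.1 with
      | some bv => (merge_h2_block kv.2 bv).foldl (fun a l => a ++ [l]) acc
      | none => kv.2.foldl (fun a l => a ++ [l]) acc)
    []
  branch_h2.items.foldl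
    (fun acc kv =>
      match main_h2.get? kv.1 with
      | none => kv.2.foldl (fun a l => a ++ [l]) acc
      | some _ => acc)
    new_md

-- ===== PORT B =====
-- B's _segments loop body: state = (dict, current title); a header line (re)starts its entry,
-- other lines are appended to the current entry (d[title].append(line) — the title is always
-- present, so modify with default [] is exact) and dropped when no title has been seen yet.
def segStepB (pfx : List Char)
    (s : PySem.Dict String (List String) × Option String) (line : String) :
    PySem.Dict String (List String) × Option String :=
  if pvHdr pfx line then (s.1.insert line [line], some line)
  else
    match s.2 with
    | none => s
    | some t => (s.1.modify t [] (fun v => v ++ [line]), some t)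

def segB (pfx : List Char) (lines : List String) : PySem.Dict String (List String) :=
  (lines.foldl (segStepB pfx) (PySem.Dict.empty, none)).1

-- _merge_children / _merge_block: a single mutual recursion over the remaining header prefixes.
-- block[0] is ported as headD "" (blocks always start with their header line); bd[title] with
-- title known present is getD with default [].
mutual
def mergeChildrenB (m : List String) (b : List String) (pfxs : List (List Char)) : List String :=
  match pfxs with
  | [] => []  -- unreachable: always called with at least one prefix
  | p :: rest =>
    let md := segB p m
    let bd := segB p b
    let out := md.items.foldl
      (fun acc kv =>
        if bd.contains kv.1 then acc ++ mergeBlockB kv.2 (bd.getD kv.1 []) rest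
        else acc ++ kv.2) []
    bd.items.foldl
      (fun acc kv => if md.contains kv.1 then acc else acc ++ kv.2) out
termination_by 2 * pfxs.length

def mergeBlockB (m : List String) (b : List String) (pfxs : List (List Char)) : List String :=
  match pfxs with
  | [] =>
    m.headD "" ::
      ((m.drop 1).filter (fun l => !pvHdr ("* ".toList) l)
        ++ (b.drop 1).filter (fun l => !pvHdr ("* ".toList) l))
  | p :: rest => m.headD "" :: mergeChildrenB (m.drop 1) (b.drop 1) (p :: rest)
termination_by 2 * pfxs.length + 1
end

def merge_md_block_alt (main : List String) (branch : List String) : List String :=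
  mergeChildrenB main branch ["## ".toList, "### ".toList]

-- ===== PRECONDITION & SPEC =====
def Spec_merge_md_block (main : List String) (branch : List String) (out : List String) : Prop := out = merge_md_block_alt main branch
instance (main : List String) (branch : List String) (out : List String) : Decidable (Spec_merge_md_block main branch out) := by unfold Spec_merge_md_block; infer_instance

-- ===== CLAIM (what is proved, stated in full; the proofs are below) =====
def Claim_equal_merge_md_block : Prop := ∀ (main : List String) (branch : List String), Dom_merge_md_block main branch → Spec_merge_md_block main branch (merge_md_block main branch)

-- ===== LEMMAS AND PROOFS =====

-- A's pending state flushed into the dict (what A does at a header line and at end of input).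
def flushIf (d : PySem.Dict String (List String)) (blk : List String) (topt : Option String) :
    PySem.Dict String (List String) :=
  match topt with
  | some t => d.insert t blk
  | none => d

lemma step_sim (pfx : List Char) (l : String) (d : PySem.Dict String (List String))
    (blk : List String) (topt : Option String) :
    segStepB pfx (flushIf d blk topt, topt) l
      = (flushIf (parseStepA pfx (d, blk, topt) l).1 (parseStepA pfx (d, blk, topt) l).2.1
          (parseStepA pfx (d, blk, topt) l).2.2,
         (parseStepA pfx (d, blk, topt) l).2.2) := by
  cases topt with
  | none =>
    by_cases hh : pvHdr pfx l = true <;>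
      simp [segStepB, parseStepA, flushIf, hh]
  | some t =>
    by_cases hh : pvHdr pfx l = true <;>
      simp [segStepB, parseStepA, flushIf, hh, PySem.Dict.modify,
        PySem.Dict.getD_insert_self, PySem.Dict.insert_insert_self]

lemma seg_sim (pfx : List Char) (lines : List String) :
    ∀ (d : PySem.Dict String (List String)) (blk : List String) (topt : Option String),
    lines.foldl (segStepB pfx) (flushIf d blk topt, topt)
      = (flushIf (lines.foldl (parseStepA pfx) (d, blk, topt)).1
          (lines.foldl (parseStepA pfx) (d, blk, topt)).2.1
          (lines.foldl (parseStepA pfx) (d, blk, topt)).2.2,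
         (lines.foldl (parseStepA pfx) (d, blk, topt)).2.2) := by
  induction lines with
  | nil => intro d blk topt; rfl
  | cons l ls ih =>
    intro d blk topt
    rw [List.foldl_cons, List.foldl_cons, step_sim]
    rcases h : parseStepA pfx (d, blk, topt) l with ⟨d', blk', t'⟩
    exact ih d' blk' t'

lemma seg_eq (pfx : List Char) (lines : List String) :
    segB pfx lines = parseBlocksA pfx lines := by
  unfold segB parseBlocksA
  have h := seg_sim pfx lines PySem.Dict.empty [] none
  simp only [flushIf] at h
  rw [h]

lemma h3_fold_snd (p : String → Bool) : ∀ (ls : List String) (s : List String × List String),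
    (ls.foldl (fun (s : List String × List String) l =>
        if p l = true then (s.1 ++ [l], s.2) else (s.1, s.2 ++ [l])) s).2
      = s.2 ++ ls.filter (fun l => !p l) := by
  intro ls
  induction ls with
  | nil => intro s; simp
  | cons l t ih =>
    intro s
    by_cases hl : p l = true <;>
      simp [List.foldl_cons, hl, ih, List.append_assoc]

lemma leaf_eq (m b : List String) : merge_h3_block m b = mergeBlockB m b [] := by
  unfold merge_h3_block mergeBlockB
  rw [h3_fold_snd (pvHdr ("* ".toList)), h3_fold_snd (pvHdr ("* ".toList))]
  simp

-- A's two merge loops (per-line appends, get?-match) equal B's (++-appends, contains/getD),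
-- with A's initial accumulator pulled out front.
lemma loops_eq (md bd : PySem.Dict String (List String))
    (fA fB : List String → List String → List String)
    (hf : ∀ x y, fA x y = fB x y) (init : List String) :
    bd.items.foldl
      (fun acc kv =>
        match md.get? kv.1 with
        | none => kv.2.foldl (fun a l => a ++ [l]) acc
        | some _ => acc)
      (md.items.foldl
        (fun acc kv =>
          match bd.get? kv.1 with
          | some bv => (fA kv.2 bv).foldl (fun a l => a ++ [l]) acc
          | none => kv.2.foldl (fun a l => a ++ [l]) acc)
        init)
    = init ++
      bd.items.foldl
        (fun acc kv => if md.contains kv.1 then acc else acc ++ kv.2)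
        (md.items.foldl
          (fun acc kv =>
            if bd.contains kv.1 then acc ++ fB kv.2 (bd.getD kv.1 []) else acc ++ kv.2)
          []) := by
  have hg1A : md.items.foldl
      (fun acc kv => match bd.get? kv.1 with
        | some bv => (fA kv.2 bv).foldl (fun a l => a ++ [l]) acc
        | none => kv.2.foldl (fun a l => a ++ [l]) acc) init
      = md.items.foldl (fun acc kv => acc ++ (match bd.get? kv.1 with
        | some _ => fB kv.2 (bd.getD kv.1 []) | none => kv.2)) init := by
    apply PySem.List.foldl_congr_mem
    intro acc kv _
    cases hb : bd.get? kv.1 with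
    | none => simp only [PySem.List.foldl_append_singleton_eq_self]
    | some bv =>
      simp only [PySem.List.foldl_append_singleton_eq_self]
      rw [PySem.Dict.getD_of_get?_eq_some bd [] hb, hf]
  have hg1B : md.items.foldl
      (fun acc kv => if bd.contains kv.1 then acc ++ fB kv.2 (bd.getD kv.1 []) else acc ++ kv.2) []
      = md.items.foldl (fun acc kv => acc ++ (match bd.get? kv.1 with
        | some _ => fB kv.2 (bd.getD kv.1 []) | none => kv.2)) [] := by
    apply PySem.List.foldl_congr_mem
    intro acc kv _
    rw [PySem.Dict.contains_eq_isSome_get?]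
    cases hb : bd.get? kv.1 <;> simp
  have hg2A : ∀ init' : List String, bd.items.foldl
      (fun acc kv => match md.get? kv.1 with
        | none => kv.2.foldl (fun a l => a ++ [l]) acc
        | some _ => acc) init'
      = bd.items.foldl (fun acc kv => acc ++ (match md.get? kv.1 with
        | none => kv.2 | some _ => [])) init' := by
    intro init'
    apply PySem.List.foldl_congr_mem
    intro acc kv _
    cases hb : md.get? kv.1 with
    | none => simp only [PySem.List.foldl_append_singleton_eq_self]
    | some bv => simp
  have hg2B : ∀ init' : List String, bd.items.foldl
      (fun acc kv => if md.contains kv.1 then acc else acc ++ kv.2) init'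
      = bd.items.foldl (fun acc kv => acc ++ (match md.get? kv.1 with
        | none => kv.2 | some _ => [])) init' := by
    intro init'
    apply PySem.List.foldl_congr_mem
    intro acc kv _
    rw [PySem.Dict.contains_eq_isSome_get?]
    cases hb : md.get? kv.1 <;> simp
  rw [hg1A, hg1B, hg2A, hg2B,
    PySem.List.foldl_append_eq_flatMap, PySem.List.foldl_append_eq_flatMap,
    PySem.List.foldl_append_eq_flatMap, PySem.List.foldl_append_eq_flatMap]
  simp [List.append_assoc]

lemma mid_eq (m b : List String) : merge_h2_block m b = mergeBlockB m b ["### ".toList] := by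
  show (let main_h3 := parseBlocksA ("### ".toList) (m.drop 1)
        let branch_h3 := parseBlocksA ("### ".toList) (b.drop 1)
        let new_md := main_h3.items.foldl
          (fun acc kv =>
            match branch_h3.get? kv.1 with
            | some bv => (merge_h3_block kv.2 bv).foldl (fun a l => a ++ [l]) acc
            | none => kv.2.foldl (fun a l => a ++ [l]) acc)
          [m.headD ""]
        branch_h3.items.foldl
          (fun acc kv =>
            match main_h3.get? kv.1 with
            | none => kv.2.foldl (fun a l => a ++ [l]) acc
            | some _ => acc)
          new_md) = _
  simp only []
  rw [loops_eq _ _ merge_h3_block (fun x y => mergeBlockB x y []) leaf_eq]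
  rw [mergeBlockB, mergeChildrenB, seg_eq, seg_eq]
  simp

-- ===== VERDICT (by name: the statement is the Claim_ definition above) =====
theorem merge_md_block_spec : Claim_equal_merge_md_block := by
  intro main branch _
  show merge_md_block main branch = merge_md_block_alt main branch
  unfold merge_md_block merge_md_block_alt
  simp only []
  rw [loops_eq _ _ merge_h2_block (fun x y => mergeBlockB x y ["### ".toList]) mid_eq]
  rw [mergeChildrenB, seg_eq, seg_eq]
  simp
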